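-- pv_equiv track=rewrite | github.com/weirdtangent/pulse-os | bin/tools/pulse-config-align.py | _find_differing_vars
-- ===== SOURCE A (Python) =====
-- def _find_differing_vars(
--     vars_by_host: dict[str, dict[str, str]],
--     ignore_vars: set[str] | None = None,
-- ) -> set[str]:
--     """Find all variable names that have different values across any hosts."""
--     ignore_vars = ignore_vars or set()
--     all_vars: set[str] = set()
--     for host_vars in vars_by_host.values():
--         all_vars.update(host_vars.keys())
--     all_vars -= ignore_vars
--
--     differing: set[str] = set()
--     for var in all_vars:
--         values = set()
--         for host_vars in vars_by_host.values():
--             values.add(host_vars.get(var))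
--         if len(values) > 1:
--             differing.add(var)
--     return differing
-- ===== SOURCE B (Python) =====
-- def _find_differing_vars(
--     vars_by_host: dict[str, dict[str, str]],
--     ignore_vars: set[str] | None = None,
-- ) -> set[str]:
--     """Single pass: accumulate per-variable value sets and presence counts;
--     a variable differs if it has >1 distinct value or is absent from some host."""
--     ignored = ignore_vars or set()
--     total = len(vars_by_host)
--     info: dict[str, tuple[set[str], int]] = {}
--     for host_vars in vars_by_host.values():
--         for var, value in host_vars.items():
--             if var in ignored:
--                 continue
--             entry = info.get(var)
--             if entry is None:
--                 info[var] = ({value}, 1)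
--             else:
--                 values, count = entry
--                 values.add(value)
--                 info[var] = (values, count + 1)
--     return {var for var, (values, count) in info.items()
--             if len(values) > 1 or count < total}
-- ===== Notes on version B (the rewrite author's own statement) =====
-- stated objective: faster
-- what changed: Instead of collecting all variable names and then re-scanning every host's dict per variable, B makes one pass over all host items, accumulating per-variable value sets and presence counts, and marks a variable differing when it has more than one distinct value or its presence count is below the number of hosts (implicit None).
import Mathlib
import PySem

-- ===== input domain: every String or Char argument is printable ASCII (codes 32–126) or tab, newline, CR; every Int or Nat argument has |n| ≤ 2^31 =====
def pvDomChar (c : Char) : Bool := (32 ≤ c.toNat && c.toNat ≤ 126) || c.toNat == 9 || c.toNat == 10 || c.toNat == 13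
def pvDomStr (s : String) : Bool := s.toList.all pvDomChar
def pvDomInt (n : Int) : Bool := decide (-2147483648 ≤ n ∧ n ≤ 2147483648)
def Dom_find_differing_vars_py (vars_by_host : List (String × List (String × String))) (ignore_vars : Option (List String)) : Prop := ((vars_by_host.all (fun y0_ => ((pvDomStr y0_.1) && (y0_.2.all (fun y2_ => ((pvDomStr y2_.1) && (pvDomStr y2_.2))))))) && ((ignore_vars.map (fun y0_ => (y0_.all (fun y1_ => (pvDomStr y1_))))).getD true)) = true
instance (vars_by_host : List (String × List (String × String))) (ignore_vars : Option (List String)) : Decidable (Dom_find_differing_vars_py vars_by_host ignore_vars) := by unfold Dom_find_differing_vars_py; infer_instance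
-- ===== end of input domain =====

-- B replaces A's per-variable rescan of every host by one pass over all host items accumulating
-- per-variable value sets and presence counts (objective: faster).

-- ===== PORT A =====
def find_differing_vars_py (vars_by_host : List (String × List (String × String))) (ignore_vars : Option (List String)) : List String :=
  -- 'ignore_vars or set()': None and the (falsy) empty set both yield the empty set
  let ignore : PySem.Set String := ignore_vars.getD PySem.Set.empty
  let all_vars : PySem.Set String :=
    vars_by_host.foldl (fun acc h => PySem.Set.update acc ((PySem.Dict.mk h.2).keys)) PySem.Set.empty
  let all_vars := PySem.Set.diff all_vars ignore
  all_vars.foldl (fun differing v =>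
      let values : PySem.Set (Option String) :=
        vars_by_host.foldl (fun vs h => PySem.Set.add vs ((PySem.Dict.mk h.2).get? v)) PySem.Set.empty
      if 1 < PySem.Set.len values then PySem.Set.add differing v else differing)
    PySem.Set.empty

-- ===== PORT B =====
def find_differing_vars_py_alt (vars_by_host : List (String × List (String × String))) (ignore_vars : Option (List String)) : List String :=
  let ignored : PySem.Set String := ignore_vars.getD PySem.Set.empty
  let total : Int := vars_by_host.length
  let info : PySem.Dict String (PySem.Set String × Int) :=
    vars_by_host.foldl (fun info h =>
      h.2.foldl (fun info kv =>
        if PySem.Set.contains ignored kv.1 then info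
        else match info.get? kv.1 with
          | none => info.insert kv.1 ([kv.2], 1)
          | some (values, count) => info.insert kv.1 (PySem.Set.add values kv.2, count + 1))
        info)
      PySem.Dict.empty
  (info.items.filter (fun p => decide (1 < PySem.Set.len p.2.1) || decide (p.2.2 < total))).map (·.1)

-- ===== PRECONDITION & SPEC =====
-- Pre_ excludes inputs where some host's variable association list repeats a key: such a list does
-- not encode any Python dict (dict keys are unique), and first-match lookup vs per-item counting
-- read the ambiguous encoding differently.
def Pre_find_differing_vars_py (vars_by_host : List (String × List (String × String))) (ignore_vars : Option (List String)) : Prop :=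
  ∀ h ∈ vars_by_host, (h.2.map Prod.fst).Nodup
instance (vars_by_host : List (String × List (String × String))) (ignore_vars : Option (List String)) : Decidable (Pre_find_differing_vars_py vars_by_host ignore_vars) := by unfold Pre_find_differing_vars_py; infer_instance
def pvWitness_find_differing_vars_py : (List (String × List (String × String))) × Option (List String) :=
  ([("h1", [("a", "1"), ("b", "2")]), ("h2", [("a", "3")])], some ["b"])

def Spec_find_differing_vars_py (vars_by_host : List (String × List (String × String))) (ignore_vars : Option (List String)) (out : List String) : Prop := out = find_differing_vars_py_alt vars_by_host ignore_vars
instance (vars_by_host : List (String × List (String × String))) (ignore_vars : Option (List String)) (out : List String) : Decidable (Spec_find_differing_vars_py vars_by_host ignore_vars out) := by unfold Spec_find_differing_vars_py; infer_instance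

-- ===== CLAIM (what is proved, stated in full; the proofs are below) =====
def Claim_equal_find_differing_vars_py : Prop := ∀ (vars_by_host : List (String × List (String × String))) (ignore_vars : Option (List String)), Dom_find_differing_vars_py vars_by_host ignore_vars → Pre_find_differing_vars_py vars_by_host ignore_vars → Spec_find_differing_vars_py vars_by_host ignore_vars (find_differing_vars_py vars_by_host ignore_vars)

-- ===== LEMMAS AND PROOFS =====

-- B's inner loop body, named for the proofs
def pvStep (ig : PySem.Set String) (info : PySem.Dict String (PySem.Set String × Int)) (kv : String × String) : PySem.Dict String (PySem.Set String × Int) :=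
  if PySem.Set.contains ig kv.1 then info
  else match info.get? kv.1 with
    | none => info.insert kv.1 ([kv.2], 1)
    | some (values, count) => info.insert kv.1 (PySem.Set.add values kv.2, count + 1)

-- the non-ignored variable names in first-occurrence order, and per-variable values / counts
def pvKeys (ig : PySem.Set String) (l : List (String × String)) : List String :=
  (PySem.Set.ofList (l.map Prod.fst)).filter (fun v => !PySem.Set.contains ig v)
def pvVals (l : List (String × String)) (v : String) : PySem.Set String :=
  PySem.Set.ofList ((l.filter (fun e => e.1 == v)).map Prod.snd)
def pvCnt (l : List (String × String)) (v : String) : Int :=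
  ((l.map Prod.fst).count v : Int)

theorem pv_cnt_append (l : List (String × String)) (e : String × String) (v : String) :
    pvCnt (l ++ [e]) v = pvCnt l v + (if e.1 == v then 1 else 0) := by
  unfold pvCnt
  rw [List.map_append, List.count_append]
  push_cast
  by_cases h : (e.1 == v) = true
  · simp [List.count_cons, h]
  · simp [List.count_cons, h]

theorem pv_keys_append (ig : PySem.Set String) (l : List (String × String)) (e : String × String) :
    pvKeys ig (l ++ [e]) =
      if PySem.Set.contains ig e.1 = true ∨ e.1 ∈ l.map Prod.fst then pvKeys ig l
      else pvKeys ig l ++ [e.1] := by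
  unfold pvKeys
  rw [List.map_append, PySem.Set.ofList_append]
  show ((PySem.Set.ofList (l.map Prod.fst)).add e.1).filter _ = _
  show (if PySem.Set.contains (PySem.Set.ofList (l.map Prod.fst)) e.1 then _ else (PySem.Set.ofList (l.map Prod.fst)) ++ [e.1]).filter _ = _
  by_cases hmem : e.1 ∈ l.map Prod.fst
  · have h1 : PySem.Set.contains (PySem.Set.ofList (l.map Prod.fst)) e.1 = true := by
      simp [PySem.Set.contains, PySem.Set.mem_ofList, hmem]
    rw [h1]
    simp [hmem]
  · have h1 : PySem.Set.contains (PySem.Set.ofList (l.map Prod.fst)) e.1 = false := by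
      simp [PySem.Set.contains, PySem.Set.mem_ofList, hmem]
    rw [h1]
    simp only [Bool.false_eq_true, if_false, List.filter_append, List.filter_cons, List.filter_nil]
    by_cases hig : e.1 ∈ ig
    · have h2 : (!PySem.Set.contains ig e.1) = false := by simp [PySem.Set.contains, hig]
      rw [h2]
      simp [hig]
    · have h2 : (!PySem.Set.contains ig e.1) = true := by simp [PySem.Set.contains, hig]
      rw [h2]
      have h3 : ¬ (PySem.Set.contains ig e.1 = true ∨ e.1 ∈ l.map Prod.fst) := by
        simp [PySem.Set.contains, hig, hmem]
      rw [if_neg h3]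
      simp

theorem pv_vals_append (l : List (String × String)) (e : String × String) (v : String) :
    pvVals (l ++ [e]) v =
      if e.1 == v then PySem.Set.add (pvVals l v) e.2 else pvVals l v := by
  unfold pvVals
  rw [List.filter_append, List.filter_cons, List.filter_nil]
  by_cases h : (e.1 == v) = true
  · rw [if_pos h, if_pos h, List.map_append, PySem.Set.ofList_append]
    rfl
  · rw [if_neg h, if_neg h, List.append_nil]

theorem pv_mem_keys_iff (ig : PySem.Set String) (l : List (String × String)) (v : String) :
    v ∈ pvKeys ig l ↔ v ∈ l.map Prod.fst ∧ ¬ (PySem.Set.contains ig v = true) := by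
  unfold pvKeys
  rw [List.mem_filter, PySem.Set.mem_ofList]
  simp

theorem pvStep_ig {ig : PySem.Set String} {d : PySem.Dict String (PySem.Set String × Int)} {e : String × String}
    (h : PySem.Set.contains ig e.1 = true) : pvStep ig d e = d := by
  unfold pvStep; rw [if_pos h]

theorem pvStep_some {ig : PySem.Set String} {d : PySem.Dict String (PySem.Set String × Int)} {e : String × String}
    {s : PySem.Set String} {c : Int} (h : ¬ PySem.Set.contains ig e.1 = true)
    (hg : d.get? e.1 = some (s, c)) :
    pvStep ig d e = d.insert e.1 (PySem.Set.add s e.2, c + 1) := by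
  unfold pvStep; rw [if_neg h, hg]

theorem pvStep_none {ig : PySem.Set String} {d : PySem.Dict String (PySem.Set String × Int)} {e : String × String}
    (h : ¬ PySem.Set.contains ig e.1 = true) (hg : d.get? e.1 = none) :
    pvStep ig d e = d.insert e.1 ([e.2], 1) := by
  unfold pvStep; rw [if_neg h, hg]

-- central invariant: B's dict after folding over the items list l
theorem pv_items_fold (ig : PySem.Set String) (l : List (String × String)) :
    (l.foldl (pvStep ig) PySem.Dict.empty).items
      = (pvKeys ig l).map (fun v => (v, (pvVals l v, pvCnt l v))) := by
  induction l using List.reverseRecOn with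
  | nil => rfl
  | append_singleton l e ih =>
    rw [List.foldl_append, List.foldl_cons, List.foldl_nil]
    have hkeys : (l.foldl (pvStep ig) PySem.Dict.empty).keys = pvKeys ig l := by
      show (l.foldl (pvStep ig) PySem.Dict.empty).items.map Prod.fst = _
      rw [ih, List.map_map]
      simp [Function.comp_def]
    have hnodup : (l.foldl (pvStep ig) PySem.Dict.empty).keys.Nodup := by
      rw [hkeys]
      exact (PySem.Set.nodup_ofList _).filter _
    by_cases hig : PySem.Set.contains ig e.1 = true
    · rw [pvStep_ig hig, ih, pv_keys_append, if_pos (Or.inl hig)]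
      apply List.map_congr_left
      intro v hv
      have hv' : ¬ PySem.Set.contains ig v = true :=
        ((pv_mem_keys_iff ig l v).mp hv).2
      have hne : (e.1 == v) = false := by
        rw [Bool.eq_false_iff]
        intro hb
        exact hv' (eq_of_beq hb ▸ hig)
      rw [pv_vals_append, pv_cnt_append, hne]
      simp
    · by_cases hmem : e.1 ∈ l.map Prod.fst
      · have hkmem : e.1 ∈ pvKeys ig l :=
          (pv_mem_keys_iff ig l e.1).mpr ⟨hmem, hig⟩
        have hget : (l.foldl (pvStep ig) PySem.Dict.empty).get? e.1
            = some (pvVals l e.1, pvCnt l e.1) := by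
          rw [PySem.Dict.get?_eq_some_iff_mem_items _ _ _ hnodup, ih]
          exact List.mem_map_of_mem hkmem
        rw [pvStep_some hig hget]
        have hcont : (l.foldl (pvStep ig) PySem.Dict.empty).contains e.1 = true :=
          (PySem.Dict.contains_iff_mem_keys _ _).mpr (hkeys ▸ hkmem)
        rw [PySem.Dict.items_insert_of_contains _ _ hcont, ih, List.map_map]
        rw [pv_keys_append, if_pos (Or.inr hmem)]
        apply List.map_congr_left
        intro v hv
        simp only [Function.comp_apply]
        by_cases hveq : (v == e.1) = true
        · have hv' : v = e.1 := eq_of_beq hveq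
          subst hv'
          rw [if_pos hveq, pv_vals_append, pv_cnt_append]
          simp
        · rw [if_neg (by simp_all), pv_vals_append, pv_cnt_append]
          have hne : (e.1 == v) = false := by
            rw [Bool.eq_false_iff]
            intro hb
            exact hveq (beq_iff_eq.mpr (eq_of_beq hb).symm)
          rw [hne]
          simp
      · have hget : (l.foldl (pvStep ig) PySem.Dict.empty).get? e.1 = none := by
          rw [PySem.Dict.get?_eq_none_iff_not_mem_keys, hkeys]
          intro hk
          exact hmem ((pv_mem_keys_iff ig l e.1).mp hk).1
        rw [pvStep_none hig hget]
        have hcont : (l.foldl (pvStep ig) PySem.Dict.empty).contains e.1 = false := by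
          rw [Bool.eq_false_iff]
          intro hc
          have := (PySem.Dict.contains_iff_mem_keys _ _).mp hc
          rw [hkeys] at this
          exact hmem ((pv_mem_keys_iff ig l e.1).mp this).1
        rw [PySem.Dict.items_insert_of_not_contains _ _ hcont, ih]
        rw [pv_keys_append, if_neg (by
          intro hor
          rcases hor with h | h
          · exact hig h
          · exact hmem h)]
        rw [List.map_append]
        congr 1
        · apply List.map_congr_left
          intro v hv
          have hvm : v ∈ l.map Prod.fst := ((pv_mem_keys_iff ig l v).mp hv).1
          have hne : (e.1 == v) = false := by
            rw [Bool.eq_false_iff]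
            intro hb
            exact hmem (eq_of_beq hb ▸ hvm)
          rw [pv_vals_append, pv_cnt_append, hne]
          simp
        · have hfilt : l.filter (fun e' => e'.1 == e.1) = [] := by
            rw [List.filter_eq_nil_iff]
            intro a ha hb
            exact hmem (eq_of_beq hb ▸ List.mem_map_of_mem ha)
          have hvals : pvVals (l ++ [e]) e.1 = [e.2] := by
            rw [pv_vals_append, if_pos (by simp)]
            unfold pvVals
            rw [hfilt]
            rfl
          have hcnt : pvCnt (l ++ [e]) e.1 = 1 := by
            rw [pv_cnt_append, if_pos (by simp)]
            unfold pvCnt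
            have : (l.map Prod.fst).count e.1 = 0 := by
              rw [List.count_eq_zero]
              exact hmem
            rw [this]
            simp
          simp only [List.map_cons, List.map_nil, hvals, hcnt]

-- A: accumulation of all_vars
theorem pv_foldl_update (l : List (String × List (String × String))) (s : PySem.Set String) :
    l.foldl (fun acc h => PySem.Set.update acc ((PySem.Dict.mk h.2).keys)) s
      = PySem.Set.update s (l.flatMap (fun h => h.2.map Prod.fst)) := by
  induction l generalizing s with
  | nil => rfl
  | cons h t ih =>
    rw [List.foldl_cons, ih, List.flatMap_cons, PySem.Set.update_append]
    rfl

-- B: the nested fold is the fold over the flattened items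
theorem pv_foldl_flat (step : PySem.Dict String (PySem.Set String × Int) → (String × String) → PySem.Dict String (PySem.Set String × Int))
    (l : List (String × List (String × String))) (d : PySem.Dict String (PySem.Set String × Int)) :
    l.foldl (fun info h => h.2.foldl step info) d = (l.flatMap (fun h => h.2)).foldl step d := by
  induction l generalizing d with
  | nil => rfl
  | cons h t ih =>
    rw [List.foldl_cons, ih, List.flatMap_cons, List.foldl_append]

theorem pv_ofList_self {α : Type} [BEq α] [LawfulBEq α] (l : List α) (h : l.Nodup) :
    PySem.Set.ofList l = l := by
  induction l using List.reverseRecOn with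
  | nil => rfl
  | append_singleton t a ih =>
    rw [PySem.Set.ofList_append]
    have ht : t.Nodup := (List.nodup_append.mp h).1
    have ha : a ∉ t := by
      have hd := (List.nodup_append.mp h).2.2
      intro hm
      exact hd a hm a (List.mem_singleton_self a) rfl
    show (PySem.Set.ofList t).add a = t ++ [a]
    rw [ih ht]
    show (if PySem.Set.contains t a then t else t ++ [a]) = t ++ [a]
    have : PySem.Set.contains t a = false := by
      simp [PySem.Set.contains, ha]
    rw [this]
    simp

-- A: the inner per-variable values loop
theorem pv_foldl_add {α β : Type} [BEq β] (l : List α) (g : α → β) (s : PySem.Set β) :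
    l.foldl (fun vs h => PySem.Set.add vs (g h)) s = PySem.Set.update s (l.map g) := by
  induction l generalizing s with
  | nil => rfl
  | cons h t ih =>
    rw [List.foldl_cons, ih, List.map_cons]
    rfl

-- per-host facts under unique keys
theorem pv_get_eq (xs : List (String × String)) (v : String) (h : (xs.map Prod.fst).Nodup) :
    (xs.filter (fun e => e.1 == v)).map Prod.snd = ((PySem.Dict.mk xs).get? v).toList := by
  induction xs with
  | nil => rfl
  | cons e t ih =>
    obtain ⟨k, w⟩ := e
    rw [List.map_cons] at h
    have ht : (t.map Prod.fst).Nodup := h.of_cons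
    have hk : k ∉ t.map Prod.fst := (List.nodup_cons.mp h).1
    rw [List.filter_cons]
    have hmk : (PySem.Dict.mk ((k, w) :: t)).get? v = if k == v then some w else (PySem.Dict.mk t).get? v :=
      PySem.Dict.get?_mk_cons k w t v
    rw [hmk]
    by_cases hkv : (k == v) = true
    · have hv : k = v := eq_of_beq hkv
      simp only [hkv, if_true]
      have hfil : t.filter (fun e => e.1 == v) = [] := by
        rw [List.filter_eq_nil_iff]
        intro a ha hb
        exact hk (hv ▸ eq_of_beq hb ▸ List.mem_map_of_mem ha)
      show ((k, w) :: t.filter (fun e => e.1 == v)).map Prod.snd = [w]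
      rw [hfil]
      rfl
    · simp only [hkv, if_false]
      simpa [hkv] using ih ht

theorem pv_count_eq (xs : List (String × String)) (v : String) (h : (xs.map Prod.fst).Nodup) :
    (xs.map Prod.fst).count v = if ((PySem.Dict.mk xs).get? v).isSome then 1 else 0 := by
  induction xs with
  | nil => rfl
  | cons e t ih =>
    obtain ⟨k, w⟩ := e
    rw [List.map_cons] at h
    have ht : (t.map Prod.fst).Nodup := h.of_cons
    have hk : k ∉ t.map Prod.fst := (List.nodup_cons.mp h).1
    have hmk : (PySem.Dict.mk ((k, w) :: t)).get? v = if k == v then some w else (PySem.Dict.mk t).get? v :=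
      PySem.Dict.get?_mk_cons k w t v
    rw [List.map_cons, List.count_cons, hmk, ih ht]
    by_cases hkv : (k == v) = true
    · have hv : k = v := eq_of_beq hkv
      have hnone : (PySem.Dict.mk t).get? v = none := by
        rw [PySem.Dict.get?_eq_none_iff_not_mem_keys]
        show v ∉ t.map Prod.fst
        exact hv ▸ hk
      simp [hkv, hnone]
    · simp [hkv]

theorem pv_isSome_iff (xs : List (String × String)) (v : String) :
    ((PySem.Dict.mk xs).get? v).isSome = true ↔ v ∈ xs.map Prod.fst := by
  have h1 := PySem.Dict.get?_eq_none_iff_not_mem_keys (PySem.Dict.mk xs) v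
  have h2 : (PySem.Dict.mk xs).keys = xs.map Prod.fst := rfl
  rw [h2] at h1
  cases hg : (PySem.Dict.mk xs).get? v
  · rw [hg] at h1
    simp only [Option.isSome_none]
    constructor
    · intro hc; cases hc
    · intro hm
      exact absurd (h1.mp rfl) fun hn => hn hm
  · rw [hg] at h1
    simp only [Option.isSome_some, true_iff]
    by_contra hm
    cases h1.mpr hm

theorem pv_vals_flat (vbh : List (String × List (String × String))) (v : String)
    (hpre : ∀ h ∈ vbh, (h.2.map Prod.fst).Nodup) :
    ((vbh.flatMap (fun h => h.2)).filter (fun e => e.1 == v)).map Prod.snd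
      = (vbh.map (fun h => (PySem.Dict.mk h.2).get? v)).filterMap id := by
  induction vbh with
  | nil => rfl
  | cons h t ih =>
    rw [List.flatMap_cons, List.filter_append, List.map_append, List.map_cons, List.filterMap_cons,
      pv_get_eq h.2 v (hpre h (List.mem_cons_self)), ih (fun x hx => hpre x (List.mem_cons_of_mem _ hx))]
    cases hg : (PySem.Dict.mk h.2).get? v <;> simp

theorem pv_count_flat (vbh : List (String × List (String × String))) (v : String)
    (hpre : ∀ h ∈ vbh, (h.2.map Prod.fst).Nodup) :
    ((vbh.flatMap (fun h => h.2)).map Prod.fst).count v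
      = (vbh.map (fun h => (PySem.Dict.mk h.2).get? v)).countP Option.isSome := by
  induction vbh with
  | nil => rfl
  | cons h t ih =>
    rw [List.flatMap_cons, List.map_append, List.count_append, List.map_cons, List.countP_cons,
      pv_count_eq h.2 v (hpre h (List.mem_cons_self)), ih (fun x hx => hpre x (List.mem_cons_of_mem _ hx))]
    by_cases hs : ((PySem.Dict.mk h.2).get? v).isSome = true <;> simp [hs] <;> omega

theorem pv_countP_lt_iff (m : List (Option String)) :
    m.countP Option.isSome < m.length ↔ none ∈ m := by
  constructor
  · intro hlt
    by_contra hn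
    have hall : ∀ a ∈ m, Option.isSome a = true := by
      intro a ha
      cases a with
      | none => exact absurd ha hn
      | some w => rfl
    rw [List.countP_eq_length.mpr hall] at hlt
    omega
  · intro hn
    have hne : m.countP Option.isSome ≠ m.length := by
      intro heq
      have := List.countP_eq_length.mp heq none hn
      cases this
    have hle := List.countP_le_length (l := m) (p := Option.isSome)
    omega

theorem pv_toFinset_card (m : List (Option String)) :
    m.toFinset.card = (m.filterMap id).toFinset.card + (if none ∈ m then 1 else 0) := by
  have himg : m.toFinset =
      (if none ∈ m then insert none ((m.filterMap id).toFinset.image some)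
       else (m.filterMap id).toFinset.image some) := by
    ext o
    cases o with
    | none =>
      by_cases hn : (none : Option String) ∈ m <;> simp [hn]
    | some w =>
      by_cases hn : (none : Option String) ∈ m <;>
        simp [hn, List.mem_filterMap]
  rw [himg]
  have hcard : ((m.filterMap id).toFinset.image some).card = (m.filterMap id).toFinset.card :=
    Finset.card_image_of_injective _ (Option.some_injective String)
  by_cases hn : (none : Option String) ∈ m
  · rw [if_pos hn, if_pos hn, Finset.card_insert_of_notMem (by simp), hcard]
  · rw [if_neg hn, if_neg hn, hcard]
    omega

theorem pv_ofList_length_eq (m : List (Option String)) :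
    (PySem.Set.ofList m).length = m.toFinset.card := by
  have h1 : (PySem.Set.ofList m).toFinset = m.toFinset := by
    ext o; simp [List.mem_toFinset, PySem.Set.mem_ofList]
  rw [← List.toFinset_card_of_nodup (PySem.Set.nodup_ofList m), h1]

theorem pv_ofList_length_eq' (m : List String) :
    (PySem.Set.ofList m).length = m.toFinset.card := by
  have h1 : (PySem.Set.ofList m).toFinset = m.toFinset := by
    ext o; simp [List.mem_toFinset, PySem.Set.mem_ofList]
  rw [← List.toFinset_card_of_nodup (PySem.Set.nodup_ofList m), h1]

theorem pv_card_cond (m : List (Option String)) (w : String) (hw : some w ∈ m) :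
    (1 < (PySem.Set.ofList m).length
      ↔ 1 < (PySem.Set.ofList (m.filterMap id)).length ∨ none ∈ m) := by
  rw [pv_ofList_length_eq, pv_toFinset_card, pv_ofList_length_eq']
  have hpos : 0 < (m.filterMap id).toFinset.card := by
    apply Finset.card_pos.mpr
    exact ⟨w, by simp [List.mem_filterMap]; exact hw⟩
  by_cases hn : (none : Option String) ∈ m
  · simp only [hn, if_true, or_true, iff_true]
    omega
  · simp only [hn, if_false, or_false]
    omega

theorem pv_len_eq {α : Type} (s : PySem.Set α) : PySem.Set.len s = (s.length : Int) := rfl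

-- the pointwise condition equality
theorem pv_cond_eq (vbh : List (String × List (String × String))) (ig : PySem.Set String)
    (hpre : ∀ h ∈ vbh, (h.2.map Prod.fst).Nodup) (v : String)
    (hv : v ∈ pvKeys ig (vbh.flatMap (fun h => h.2))) :
    decide (1 < PySem.Set.len (PySem.Set.ofList (vbh.map (fun h => (PySem.Dict.mk h.2).get? v))))
      = (decide (1 < PySem.Set.len (pvVals (vbh.flatMap (fun h => h.2)) v))
          || decide (pvCnt (vbh.flatMap (fun h => h.2)) v < (vbh.length : Int))) := by
  have hm : v ∈ (vbh.flatMap (fun h => h.2)).map Prod.fst :=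
    ((pv_mem_keys_iff ig _ v).mp hv).1
  obtain ⟨e, he, hev⟩ := List.mem_map.mp hm
  obtain ⟨h, hh, heh⟩ := List.mem_flatMap.mp he
  have hsome : ((PySem.Dict.mk h.2).get? v).isSome = true :=
    (pv_isSome_iff h.2 v).mpr (hev ▸ List.mem_map_of_mem heh)
  obtain ⟨w, hw⟩ := Option.isSome_iff_exists.mp hsome
  have hwm : some w ∈ vbh.map (fun h => (PySem.Dict.mk h.2).get? v) :=
    hw ▸ List.mem_map_of_mem hh
  have hdor : ∀ (p q : Prop) [Decidable p] [Decidable q], decide (p ∨ q) = (decide p || decide q) := by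
    intro p q _ _
    by_cases hp : p <;> by_cases hq : q <;> simp [hp, hq]
  rw [← hdor]
  rw [decide_eq_decide]
  unfold pvVals pvCnt
  rw [pv_vals_flat vbh v hpre, pv_count_flat vbh v hpre]
  rw [pv_len_eq, pv_len_eq]
  have hlen : vbh.length = (vbh.map (fun h => (PySem.Dict.mk h.2).get? v)).length :=
    (List.length_map _).symm
  rw [hlen]
  have hcnt := pv_countP_lt_iff (vbh.map (fun h => (PySem.Dict.mk h.2).get? v))
  have hcard := pv_card_cond (vbh.map (fun h => (PySem.Dict.mk h.2).get? v)) w hwm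
  constructor
  · intro h1
    rcases hcard.mp (by exact_mod_cast h1) with h2 | h2
    · exact Or.inl (by exact_mod_cast h2)
    · exact Or.inr (by exact_mod_cast (hcnt.mpr h2))
  · intro h1
    have : 1 < (PySem.Set.ofList (vbh.map (fun h => (PySem.Dict.mk h.2).get? v))).length := by
      apply hcard.mpr
      rcases h1 with h2 | h2
      · exact Or.inl (by exact_mod_cast h2)
      · exact Or.inr (hcnt.mp (by exact_mod_cast h2))
    exact_mod_cast this

-- B's fold, with the loop body written exactly as in the port
theorem pv_B_fold (ig : PySem.Set String) (vbh : List (String × List (String × String))) :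
    (vbh.foldl (fun info h =>
      h.2.foldl (fun info kv =>
        if PySem.Set.contains ig kv.1 then info
        else match info.get? kv.1 with
          | none => info.insert kv.1 ([kv.2], 1)
          | some (values, count) => info.insert kv.1 (PySem.Set.add values kv.2, count + 1))
        info)
      (PySem.Dict.empty : PySem.Dict String (PySem.Set String × Int))).items
    = (pvKeys ig (vbh.flatMap (fun h => h.2))).map
        (fun v => (v, (pvVals (vbh.flatMap (fun h => h.2)) v, pvCnt (vbh.flatMap (fun h => h.2)) v))) := by
  have h1 : (fun (info : PySem.Dict String (PySem.Set String × Int)) (kv : String × String) =>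
      if PySem.Set.contains ig kv.1 then info
      else match info.get? kv.1 with
        | none => info.insert kv.1 ([kv.2], 1)
        | some (values, count) => info.insert kv.1 (PySem.Set.add values kv.2, count + 1)) = pvStep ig := rfl
  rw [h1, pv_foldl_flat (pvStep ig), pv_items_fold]

-- ===== VERDICT (by name: the statement is the Claim_ definition above) =====
theorem find_differing_vars_py_spec : Claim_equal_find_differing_vars_py := by
  intro vbh igo _hdom hpre
  unfold Spec_find_differing_vars_py find_differing_vars_py find_differing_vars_py_alt
  dsimp only
  set ig : PySem.Set String := igo.getD PySem.Set.empty with hig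
  -- A side
  rw [pv_foldl_update]
  have hA1 : vbh.flatMap (fun h => h.2.map Prod.fst) = (vbh.flatMap (fun h => h.2)).map Prod.fst := by
    rw [List.map_flatMap]
  rw [hA1]
  have hA2 : PySem.Set.diff (PySem.Set.update PySem.Set.empty ((vbh.flatMap (fun h => h.2)).map Prod.fst)) ig
      = pvKeys ig (vbh.flatMap (fun h => h.2)) := rfl
  rw [hA2]
  -- B side
  rw [pv_B_fold ig vbh, List.filter_map, List.map_map]
  -- A's outer loop: fold of conditional add over a nodup list is a filter
  have hnodup : (pvKeys ig (vbh.flatMap (fun h => h.2))).Nodup :=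
    (PySem.Set.nodup_ofList _).filter _
  have hA3 :
      (pvKeys ig (vbh.flatMap (fun h => h.2))).foldl (fun differing v =>
          if 1 < PySem.Set.len (vbh.foldl (fun vs h => PySem.Set.add vs ((PySem.Dict.mk h.2).get? v)) PySem.Set.empty)
          then PySem.Set.add differing v else differing) PySem.Set.empty
        = (pvKeys ig (vbh.flatMap (fun h => h.2))).filter
            (fun v => decide (1 < PySem.Set.len (vbh.foldl (fun vs h => PySem.Set.add vs ((PySem.Dict.mk h.2).get? v)) PySem.Set.empty))) := by
    rw [PySem.List.foldl_ite_eq_foldl_filter]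
    have hempty : (PySem.Set.empty : PySem.Set String) = [] := rfl
    rw [hempty, ← PySem.Set.ofList_eq_foldl]
    exact pv_ofList_self _ (hnodup.filter _)
  rw [hA3]
  -- reduce B's filtered map to a filter over the same key list
  simp only [Function.comp_def]
  rw [List.map_id']
  -- pointwise equality of the two conditions on the shared key list
  apply List.filter_congr
  intro v hv
  rw [pv_foldl_add]
  have hempty2 : (PySem.Set.empty : PySem.Set (Option String)) = [] := rfl
  rw [hempty2, PySem.Set.update_nil_left]
  exact pv_cond_eq vbh ig hpre v hv
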